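-- pv_equiv track=rewrite | github.com/julianschelb/Topic-Classification | src/50_Train_Classifier/50_NB_TC_Train_Multiple_LIB.py | calculate_ngram_frequencies
-- ===== SOURCE A (Python) =====
-- from collections import Counter
-- from collections import defaultdict
-- from collections import defaultdict, Counter
--
-- def calculate_ngram_frequencies(urls, genres, n_range):
--     """Calculates the frequency of n-grams for each genre from the given URLs and genres."""
--
--     ngram_freq = defaultdict(lambda: defaultdict(int))
--     genre_counts = Counter(genres)
--
--     for url, genre in zip(urls, genres):
--         for n in n_range:
--             ngrams = extract_ngrams(url, n)
--             for ngram in ngrams: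
--                 ngram_freq[genre][ngram] += 1
--
--     return ngram_freq, genre_counts
--
-- def extract_ngrams(url, n):
--     """Extracts n-grams of length n from the given URL."""
--     return [url[i:i+n] for i in range(len(url) - n + 1)]
-- ===== SOURCE B (Python) =====
-- from collections import defaultdict, Counter
--
-- def calculate_ngram_frequencies(urls, genres, n_range):
--     """Group the URLs by genre first, then count each genre's n-grams with one Counter per genre."""
--     by_genre = defaultdict(list)
--     for url, genre in zip(urls, genres):
--         by_genre[genre].append(url)
--     ngram_freq = defaultdict(lambda: defaultdict(int))
--     for genre, genre_urls in by_genre.items():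
--         counts = Counter(url[i:i + n]
--                          for url in genre_urls
--                          for n in n_range
--                          for i in range(len(url) - n + 1))
--         if counts:
--             ngram_freq[genre].update(counts)
--     return ngram_freq, Counter(genres)
-- ===== Notes on version B (the rewrite author's own statement) =====
-- stated objective: alternative
-- what changed: B first builds an index grouping the zipped URLs by genre, then counts each genre's n-grams with one Counter per genre over its grouped URLs, instead of A's single pass over (url, genre) pairs updating nested per-genre dicts event by event.
import Mathlib
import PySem

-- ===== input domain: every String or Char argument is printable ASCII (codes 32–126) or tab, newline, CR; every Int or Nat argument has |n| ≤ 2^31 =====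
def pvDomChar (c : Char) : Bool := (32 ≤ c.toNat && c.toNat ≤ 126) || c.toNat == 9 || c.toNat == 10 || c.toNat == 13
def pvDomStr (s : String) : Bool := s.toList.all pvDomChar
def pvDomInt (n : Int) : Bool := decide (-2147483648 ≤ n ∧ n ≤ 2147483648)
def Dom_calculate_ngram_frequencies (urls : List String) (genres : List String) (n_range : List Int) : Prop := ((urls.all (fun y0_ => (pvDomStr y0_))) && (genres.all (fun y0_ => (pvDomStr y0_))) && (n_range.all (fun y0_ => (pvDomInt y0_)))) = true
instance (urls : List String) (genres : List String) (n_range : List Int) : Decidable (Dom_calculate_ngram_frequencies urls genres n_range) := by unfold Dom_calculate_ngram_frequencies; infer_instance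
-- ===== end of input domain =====

-- B groups the URLs by genre first and then counts each genre's n-grams with one Counter per
-- genre (objective: alternative decomposition — an index pass, then a per-group counting pass).

-- ===== PORT A =====
def extract_ngrams (url : String) (n : Int) : List String :=
  (PySem.List.pyRange 0 ((PySem.Str.len url : Int) - n + 1) 1).map
    (fun i => PySem.Str.slice url (some i) (some (i + n)))

def calculate_ngram_frequencies (urls : List String) (genres : List String) (n_range : List Int) : (List (String × List (String × Int))) × (List (String × Int)) :=
  let genre_counts := PySem.Dict.counter genres
  let ngram_freq : PySem.Dict String (PySem.Dict String Int) :=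
    (urls.zip genres).foldl (fun acc ug =>
      n_range.foldl (fun acc n =>
        (extract_ngrams ug.1 n).foldl (fun acc ngram =>
          acc.modify ug.2 PySem.Dict.empty (fun inner => inner.modify ngram 0 (· + 1))) acc) acc)
      PySem.Dict.empty
  (ngram_freq.items.map (fun p => (p.1, p.2.items)), genre_counts.items)

-- ===== PORT B =====
def calculate_ngram_frequencies_alt (urls : List String) (genres : List String) (n_range : List Int) : (List (String × List (String × Int))) × (List (String × Int)) :=
  let by_genre : PySem.Dict String (List String) :=
    (urls.zip genres).foldl (fun d ug => d.modify ug.2 [] (fun l => l ++ [ug.1])) PySem.Dict.empty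
  let ngram_freq : PySem.Dict String (PySem.Dict String Int) :=
    by_genre.items.foldl (fun acc p =>
      let counts := PySem.Dict.counter
        (p.2.flatMap (fun url => n_range.flatMap (fun n =>
          (PySem.List.pyRange 0 ((PySem.Str.len url : Int) - n + 1) 1).map
            (fun i => PySem.Str.slice url (some i) (some (i + n))))))
      if counts.items.isEmpty then acc
      else acc.modify p.1 PySem.Dict.empty
        (fun inner => counts.items.foldl (fun d kv => d.insert kv.1 kv.2) inner))
      PySem.Dict.empty
  (ngram_freq.items.map (fun p => (p.1, p.2.items)), (PySem.Dict.counter genres).items)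

-- ===== PRECONDITION & SPEC =====
-- Pre_ excludes inputs where some zipped URL yields no n-gram for any n in n_range (every n
-- exceeds its length): there A still returns a value, but the ORDER of the outer dict's keys
-- (A: order in which genres first produce an n-gram; B: order in which genres first occur) is
-- an accidental artefact of dict insertion order, a corner on which either order is defensible.
def Pre_calculate_ngram_frequencies (urls : List String) (genres : List String) (n_range : List Int) : Prop :=
  ∀ p ∈ urls.zip genres, ∃ n ∈ n_range, n ≤ (PySem.Str.len p.1 : Int)
instance (urls : List String) (genres : List String) (n_range : List Int) : Decidable (Pre_calculate_ngram_frequencies urls genres n_range) := by unfold Pre_calculate_ngram_frequencies; infer_instance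

def pvWitness_calculate_ngram_frequencies : List String × List String × List Int := (["ab", "cd"], ["g1", "g2"], [1, 2])

def Spec_calculate_ngram_frequencies (urls : List String) (genres : List String) (n_range : List Int) (out : (List (String × List (String × Int))) × (List (String × Int))) : Prop := out = calculate_ngram_frequencies_alt urls genres n_range
instance (urls : List String) (genres : List String) (n_range : List Int) (out : (List (String × List (String × Int))) × (List (String × Int))) : Decidable (Spec_calculate_ngram_frequencies urls genres n_range out) := by unfold Spec_calculate_ngram_frequencies; infer_instance

-- ===== CLAIM (what is proved, stated in full; the proofs are below) =====
def Claim_equal_calculate_ngram_frequencies : Prop := ∀ (urls : List String) (genres : List String) (n_range : List Int), Dom_calculate_ngram_frequencies urls genres n_range → Pre_calculate_ngram_frequencies urls genres n_range → Spec_calculate_ngram_frequencies urls genres n_range (calculate_ngram_frequencies urls genres n_range)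

-- ===== LEMMAS AND PROOFS =====

-- the n-grams one url contributes (all n in n_range), and the (genre, ngram) event stream
def pvStrs (n_range : List Int) (url : String) : List String :=
  n_range.flatMap (fun n =>
    (PySem.List.pyRange 0 ((PySem.Str.len url : Int) - n + 1) 1).map
      (fun i => PySem.Str.slice url (some i) (some (i + n))))

def pvEv (n_range : List Int) (ug : String × String) : List (String × String) :=
  (pvStrs n_range ug.1).map (fun m => (ug.2, m))

-- A's elementary update, and the grouped build both sides are reduced to
def pvStep (acc : PySem.Dict String (PySem.Dict String Int)) (e : String × String) :
    PySem.Dict String (PySem.Dict String Int) :=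
  acc.modify e.1 PySem.Dict.empty (fun inner => inner.modify e.2 0 (· + 1))

def pvBuildF (gs : List String) (f : String → List String) : PySem.Dict String (PySem.Dict String Int) :=
  gs.foldl (fun d g => d.insert g (PySem.Dict.counter (f g))) PySem.Dict.empty

theorem pv_modify_eq_insert {κ ν : Type} [BEq κ] (d : PySem.Dict κ ν) (k : κ) (d0 : ν) (f : ν → ν) :
    d.modify k d0 f = d.insert k (f (d.getD k d0)) := rfl

theorem pv_foldl_flatMap {α β γ : Type} (l : List α) (f : α → List β) (g : γ → β → γ) (init : γ) :
    (l.flatMap f).foldl g init = l.foldl (fun a x => (f x).foldl g a) init := by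
  induction l generalizing init with
  | nil => rfl
  | cons x t ih => simp [List.flatMap_cons, List.foldl_append, ih]

-- ---- pvBuildF facts ----
theorem pvBuildF_items (gs : List String) (f : String → List String) (h : gs.Nodup) :
    (pvBuildF gs f).items = gs.map (fun g => (g, PySem.Dict.counter (f g))) := by
  have := PySem.Dict.items_foldl_insert_fresh gs (fun g => g)
      (fun g => PySem.Dict.counter (f g)) PySem.Dict.empty
      (fun a _ => PySem.Dict.contains_empty a) (by simpa using h)
  simpa [pvBuildF] using this

theorem pvBuildF_keys (gs : List String) (f : String → List String) (h : gs.Nodup) :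
    (pvBuildF gs f).keys = gs := by
  have h2 := congrArg (List.map Prod.fst) (pvBuildF_items gs f h)
  simpa [PySem.Dict.keys, List.map_map, Function.comp_def] using h2

theorem pvBuildF_congr (gs : List String) (f f' : String → List String)
    (h : ∀ g ∈ gs, f g = f' g) : pvBuildF gs f = pvBuildF gs f' := by
  unfold pvBuildF
  exact PySem.List.foldl_congr_mem gs _ _ _ (fun acc g hg => by rw [h g hg])

theorem pvBuildF_getD (gs : List String) (f : String → List String) (h : gs.Nodup)
    {g : String} (hg : g ∈ gs) (d0 : PySem.Dict String Int) :
    (pvBuildF gs f).getD g d0 = PySem.Dict.counter (f g) := by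
  refine PySem.Dict.getD_of_mem_items _ ?_ ?_ d0
  · rw [pvBuildF_items gs f h]
    exact List.mem_map_of_mem hg
  · rw [pvBuildF_keys gs f h]; exact h

-- ---- characterisation of A's event fold as a grouped build ----
theorem pv_filter_nil_of_not_mem (E : List (String × String)) (g : String)
    (h : g ∉ E.map Prod.fst) : E.filter (fun e => e.1 == g) = [] := by
  rw [List.filter_eq_nil_iff]
  intro e he hbe
  have he1 : e.1 = g := by simpa using hbe
  exact h (he1 ▸ List.mem_map_of_mem he)

theorem pvBuildF_append (gs : List String) (g : String) (f : String → List String) :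
    pvBuildF (gs ++ [g]) f = (pvBuildF gs f).insert g (PySem.Dict.counter (f g)) := by
  unfold pvBuildF
  rw [List.foldl_append]
  rfl

theorem pv_char (E : List (String × String)) :
    E.foldl pvStep PySem.Dict.empty
      = pvBuildF (PySem.Set.ofList (E.map Prod.fst))
          (fun g => (E.filter (fun e => e.1 == g)).map Prod.snd) := by
  induction E using List.reverseRecOn with
  | nil => rfl
  | append_singleton E e ih =>
    obtain ⟨g, m⟩ := e
    rw [List.foldl_append, List.foldl_cons, List.foldl_nil, ih, List.map_append]
    simp only [List.map_cons, List.map_nil]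
    rw [PySem.Set.ofList_append_singleton]
    have hnd : (PySem.Set.ofList (E.map Prod.fst)).Nodup := PySem.Set.nodup_ofList _
    set gs := PySem.Set.ofList (E.map Prod.fst) with hgs
    set fE : String → List String := fun g' => (E.filter (fun e => e.1 == g')).map Prod.snd with hfE
    have hfE' : ∀ g', ((E ++ [(g, m)]).filter (fun e => e.1 == g')).map Prod.snd
        = fE g' ++ (if g = g' then [m] else []) := by
      intro g'
      rw [List.filter_append, List.map_append, hfE]
      congr 1
      rw [List.filter_cons]
      by_cases h : g = g'
      · subst h; simp
      · simp [h]
    by_cases hmem : g ∈ gs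
    · rw [PySem.Set.add_of_mem hmem]
      have hcont : (pvBuildF gs fE).contains g = true := by
        rw [PySem.Dict.contains_iff_mem_keys, pvBuildF_keys gs fE hnd]; exact hmem
      apply PySem.Dict.ext
      rw [pvStep, pv_modify_eq_insert, PySem.Dict.items_insert_of_contains _ _ hcont,
          pvBuildF_items gs fE hnd, pvBuildF_items gs _ hnd, List.map_map]
      refine List.map_congr_left ?_
      intro g' hg'
      by_cases h : g' = g
      · subst h
        simp only [Function.comp, beq_self_eq_true, if_pos]
        rw [pvBuildF_getD gs fE hnd hg', hfE' g', if_pos rfl,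
            ← PySem.Dict.counter_append_singleton]
      · simp only [Function.comp]
        rw [if_neg (by simpa using h), hfE' g', if_neg (fun hh => h hh.symm)]
        simp
    · rw [PySem.Set.add_of_not_mem hmem, pvBuildF_append]
      have h1 : pvBuildF gs (fun g' => ((E ++ [(g, m)]).filter (fun e => e.1 == g')).map Prod.snd)
          = pvBuildF gs fE := by
        refine pvBuildF_congr gs _ fE ?_
        intro g' hg'
        rw [hfE' g', if_neg (fun hh => hmem (by rw [hh]; exact hg')), List.append_nil]
      rw [h1]
      have hfil : E.filter (fun e => e.1 == g) = [] :=
        pv_filter_nil_of_not_mem E g (by simpa [hgs, PySem.Set.mem_ofList] using hmem)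
      have hfg : fE g = [] := by simp [hfE, hfil]
      have hcont : (pvBuildF gs fE).contains g = false := by
        have hng : g ∉ (pvBuildF gs fE).keys := by rw [pvBuildF_keys gs fE hnd]; exact hmem
        cases hc : (pvBuildF gs fE).contains g
        · rfl
        · exact absurd ((PySem.Dict.contains_iff_mem_keys _ _).mp hc) hng
      rw [pvStep, pv_modify_eq_insert, PySem.Dict.getD_of_not_contains _ _ hcont,
          hfE' g, if_pos rfl, hfg]
      rfl

-- ---- A's nested loops produce the event fold ----
theorem pv_A_fold (urls genres : List String) (n_range : List Int) :
    ((urls.zip genres).flatMap (pvEv n_range)).foldl pvStep PySem.Dict.empty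
      = (urls.zip genres).foldl (fun acc ug =>
          n_range.foldl (fun acc n =>
            (extract_ngrams ug.1 n).foldl (fun acc ngram =>
              acc.modify ug.2 PySem.Dict.empty (fun inner => inner.modify ngram 0 (· + 1))) acc) acc)
        PySem.Dict.empty := by
  rw [pv_foldl_flatMap]
  refine PySem.List.foldl_congr_mem _ _ _ _ ?_
  intro acc ug _
  unfold pvEv pvStrs
  rw [List.foldl_map, pv_foldl_flatMap]
  refine PySem.List.foldl_congr_mem _ _ _ _ ?_
  intro acc' n _
  simp only [extract_ngrams, List.foldl_map]
  rfl

-- ---- the nonemptiness Pre_ delivers ----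
theorem pv_strs_ne_nil (n_range : List Int) (url : String)
    (h : ∃ n ∈ n_range, n ≤ (PySem.Str.len url : Int)) : pvStrs n_range url ≠ [] := by
  obtain ⟨n, hn, hle⟩ := h
  have hmem : PySem.Str.slice url (some 0) (some (0 + n)) ∈ pvStrs n_range url := by
    unfold pvStrs
    rw [List.mem_flatMap]
    exact ⟨n, hn, List.mem_map_of_mem (PySem.List.mem_pyRange_one.mpr ⟨le_refl 0, by omega⟩)⟩
  exact List.ne_nil_of_mem hmem

-- ---- Set facts: flattening nonempty constant blocks ----
theorem pv_update_const {s : PySem.Set String} {a : String} {t : List String}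
    (h : ∀ y ∈ t, y = a) : PySem.Set.update (s.add a) t = s.add a := by
  induction t with
  | nil => rfl
  | cons y t ih =>
    have hy : y = a := h y (by simp)
    rw [PySem.Set.update_cons, hy,
        PySem.Set.add_of_mem ((PySem.Set.mem_add s a a).mpr (Or.inr rfl))]
    exact ih (fun z hz => h z (by simp [hz]))

theorem pv_update_flatMap {α : Type} (F : α → List String) (G : α → String) :
    ∀ (l : List α) (s : PySem.Set String), (∀ x ∈ l, F x ≠ []) →
    PySem.Set.update s (l.flatMap (fun x => (F x).map (fun _ => G x)))
      = PySem.Set.update s (l.map G) := by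
  intro l
  induction l with
  | nil => intro s _; rfl
  | cons x t ih =>
    intro s h
    rw [List.flatMap_cons, PySem.Set.update_append, List.map_cons, PySem.Set.update_cons]
    have hblock : PySem.Set.update s ((F x).map (fun _ => G x)) = s.add (G x) := by
      cases hF : F x with
      | nil => exact absurd hF (h x (by simp))
      | cons y ys =>
        rw [List.map_cons, PySem.Set.update_cons]
        exact pv_update_const (fun z hz => by
          obtain ⟨_, _, h3⟩ := List.mem_map.mp hz; exact h3.symm)
    rw [hblock]
    exact ih _ (fun z hz => h z (by simp [hz]))

theorem pv_genres_set (urls genres : List String) (n_range : List Int)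
    (hpre : ∀ p ∈ urls.zip genres, ∃ n ∈ n_range, n ≤ (PySem.Str.len p.1 : Int)) :
    PySem.Set.ofList (((urls.zip genres).flatMap (pvEv n_range)).map Prod.fst)
      = PySem.Set.ofList ((urls.zip genres).map (fun ug => ug.2)) := by
  have hmap : ((urls.zip genres).flatMap (pvEv n_range)).map Prod.fst
      = (urls.zip genres).flatMap (fun ug => (pvStrs n_range ug.1).map (fun _ => ug.2)) := by
    rw [List.map_flatMap]
    refine List.flatMap_congr ?_
    intro ug _
    unfold pvEv
    rw [List.map_map]
    simp [Function.comp_def]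
  rw [hmap, ← PySem.Set.update_nil_left, ← PySem.Set.update_nil_left]
  exact pv_update_flatMap _ _ _ _ (fun ug hug => pv_strs_ne_nil n_range ug.1 (hpre ug hug))

-- ---- events of one genre = n-grams of that genre's urls ----
theorem pv_filter_events (n_range : List Int) (g : String) :
    ∀ (l : List (String × String)),
    ((l.flatMap (pvEv n_range)).filter (fun e => e.1 == g)).map Prod.snd
      = (l.filter (fun ug => ug.2 == g)).flatMap (fun ug => pvStrs n_range ug.1) := by
  intro l
  induction l with
  | nil => rfl
  | cons ug t ih =>
    rw [List.flatMap_cons, List.filter_append, List.map_append, ih]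
    by_cases h : ug.2 = g
    · rw [List.filter_cons_of_pos (by simpa using h), List.flatMap_cons]
      congr 1
      unfold pvEv
      rw [List.filter_map]
      have hcomp : ((fun (e : String × String) => e.1 == g) ∘ fun m => (ug.2, m))
          = fun _ => true := by
        funext m; simpa using h
      rw [hcomp, List.filter_true, List.map_map]
      simp [Function.comp_def]
    · rw [List.filter_cons_of_neg (by simpa using h)]
      have hz : (pvEv n_range ug).filter (fun e => e.1 == g) = [] := by
        unfold pvEv
        rw [List.filter_map]
        have hcomp : ((fun (e : String × String) => e.1 == g) ∘ fun m => (ug.2, m))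
            = fun _ => false := by
          funext m; simpa using h
        rw [hcomp, List.filter_false, List.map_nil]
      rw [hz, List.map_nil, List.nil_append]

-- ---- rebuilding a dict from its items ----
theorem pv_rebuild {κ ν : Type} [BEq κ] [LawfulBEq κ] (d : PySem.Dict κ ν) (h : d.keys.Nodup) :
    d.items.foldl (fun d kv => d.insert kv.1 kv.2) PySem.Dict.empty = d := by
  apply PySem.Dict.ext
  have := PySem.Dict.items_foldl_insert_fresh d.items (fun kv => kv.1) (fun kv => kv.2)
      PySem.Dict.empty (fun a _ => PySem.Dict.contains_empty a.1) h
  simpa using this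

-- ---- B's guarded grouped loop is an insert loop ----
theorem pv_B_fold (F : String → List String) :
    ∀ (gs : List String), gs.Nodup →
    ∀ (acc : PySem.Dict String (PySem.Dict String Int)),
    (∀ g ∈ gs, acc.contains g = false) → (∀ g ∈ gs, F g ≠ []) →
    gs.foldl (fun acc g =>
        if (PySem.Dict.counter (F g)).items.isEmpty then acc
        else acc.modify g PySem.Dict.empty
          (fun inner => (PySem.Dict.counter (F g)).items.foldl
            (fun d kv => d.insert kv.1 kv.2) inner)) acc
      = gs.foldl (fun d g => d.insert g (PySem.Dict.counter (F g))) acc := by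
  intro gs
  induction gs with
  | nil => intro _ acc _ _; rfl
  | cons g t ih =>
    intro hnd acc hacc hne
    rw [List.foldl_cons, List.foldl_cons]
    have hitems : (PySem.Dict.counter (F g)).items.isEmpty = false := by
      rw [PySem.Dict.items_counter]
      cases hF : F g with
      | nil => exact absurd hF (hne g (by simp))
      | cons y ys => rw [PySem.Set.ofList_cons]; simp
    rw [hitems, if_neg (by simp), pv_modify_eq_insert,
        PySem.Dict.getD_of_not_contains _ _ (hacc g (by simp)),
        pv_rebuild _ (PySem.Dict.nodup_keys_counter _)]
    have hnd' := List.nodup_cons.mp hnd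
    refine ih hnd'.2 _ ?_ (fun g' hg' => hne g' (by simp [hg']))
    intro g' hg'
    rw [PySem.Dict.contains_insert]
    have hne' : g' ≠ g := fun hh => hnd'.1 (hh ▸ hg')
    simp [hne', hacc g' (by simp [hg'])]

-- ---- the two outer dicts agree under Pre_ ----
theorem pv_outer (urls genres : List String) (n_range : List Int)
    (hpre : ∀ p ∈ urls.zip genres, ∃ n ∈ n_range, n ≤ (PySem.Str.len p.1 : Int)) :
    (urls.zip genres).foldl (fun acc ug =>
        n_range.foldl (fun acc n =>
          (extract_ngrams ug.1 n).foldl (fun acc ngram =>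
            acc.modify ug.2 PySem.Dict.empty (fun inner => inner.modify ngram 0 (· + 1))) acc) acc)
      PySem.Dict.empty
      = ((urls.zip genres).foldl (fun d ug => d.modify ug.2 [] (fun l => l ++ [ug.1]))
          PySem.Dict.empty).items.foldl (fun acc p =>
        let counts := PySem.Dict.counter
          (p.2.flatMap (fun url => n_range.flatMap (fun n =>
            (PySem.List.pyRange 0 ((PySem.Str.len url : Int) - n + 1) 1).map
              (fun i => PySem.Str.slice url (some i) (some (i + n))))))
        if counts.items.isEmpty then acc
        else acc.modify p.1 PySem.Dict.empty
          (fun inner => counts.items.foldl (fun d kv => d.insert kv.1 kv.2) inner))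
        PySem.Dict.empty := by
  set zs := urls.zip genres with hzs
  -- the grouping dict
  set by_genre : PySem.Dict String (List String) :=
    zs.foldl (fun d ug => d.modify ug.2 [] (fun l => l ++ [ug.1])) PySem.Dict.empty with hbg
  have hkeys : by_genre.keys = PySem.Set.ofList (zs.map (fun ug => ug.2)) := by
    have h := PySem.Dict.keys_foldl_modify_key zs (fun ug => ug.2) []
      (fun _ ug l => l ++ [ug.1]) PySem.Dict.empty
    rw [hbg]
    rw [show (fun (d : PySem.Dict String (List String)) (ug : String × String) =>
        d.modify ug.2 [] (fun l => l ++ [ug.1]))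
      = (fun d x => d.modify ((fun ug : String × String => ug.2) x) []
          ((fun _ ug l => l ++ [ug.1]) d x)) from rfl, h]
    simp [PySem.Set.update_nil_left]
  have hnodup : by_genre.keys.Nodup := by
    have h := PySem.Dict.nodup_keys_foldl_modify_key zs (fun ug => ug.2) []
      (fun _ ug l => l ++ [ug.1]) PySem.Dict.empty (by simp [PySem.Dict.keys_empty])
    rw [hbg]
    exact h
  have hgetD : ∀ g, by_genre.getD g [] = (zs.filter (fun ug => ug.2 == g)).map (fun ug => ug.1) := by
    intro g
    have hswap : by_genre = (zs.map Prod.swap).foldl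
        (fun d p => d.modify p.1 [] (fun l => l ++ [p.2])) PySem.Dict.empty := by
      rw [hbg, List.foldl_map]
      rfl
    rw [hswap, PySem.Dict.getD_foldl_modify_append, PySem.Dict.getD_empty, List.nil_append,
        List.filter_map, List.map_map]
    rfl
  have hitems : by_genre.items
      = (PySem.Set.ofList (zs.map (fun ug => ug.2))).map
          (fun g => (g, (zs.filter (fun ug => ug.2 == g)).map (fun ug => ug.1))) := by
    rw [PySem.Dict.items_eq_map_keys by_genre hnodup [], hkeys]
    exact List.map_congr_left (fun g _ => by rw [hgetD g])
  -- B's outer fold becomes pvBuildF over the genre set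
  set gsz := PySem.Set.ofList (zs.map (fun ug => ug.2)) with hgsz
  set FB : String → List String :=
    fun g => (zs.filter (fun ug => ug.2 == g)).flatMap (fun ug => pvStrs n_range ug.1) with hFB
  have hndz : gsz.Nodup := PySem.Set.nodup_ofList _
  have hneF : ∀ g ∈ gsz, FB g ≠ [] := by
    intro g hg
    obtain ⟨ug, hug, hug2⟩ := List.mem_map.mp ((PySem.Set.mem_ofList _ _).mp hg)
    have hmemf : ug ∈ zs.filter (fun ug => ug.2 == g) :=
      List.mem_filter.mpr ⟨hug, by simp [hug2]⟩
    obtain ⟨y, hy⟩ := List.exists_mem_of_ne_nil _ (pv_strs_ne_nil n_range ug.1 (hpre ug hug))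
    exact List.ne_nil_of_mem (List.mem_flatMap.mpr ⟨ug, hmemf, hy⟩)
  have hBfold : by_genre.items.foldl (fun acc p =>
        let counts := PySem.Dict.counter
          (p.2.flatMap (fun url => n_range.flatMap (fun n =>
            (PySem.List.pyRange 0 ((PySem.Str.len url : Int) - n + 1) 1).map
              (fun i => PySem.Str.slice url (some i) (some (i + n))))))
        if counts.items.isEmpty then acc
        else acc.modify p.1 PySem.Dict.empty
          (fun inner => counts.items.foldl (fun d kv => d.insert kv.1 kv.2) inner))
        PySem.Dict.empty
      = pvBuildF gsz FB := by
    rw [hitems, List.foldl_map]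
    have hstep : (fun (acc : PySem.Dict String (PySem.Dict String Int)) (g : String) =>
        (fun acc (p : String × List String) =>
          let counts := PySem.Dict.counter
            (p.2.flatMap (fun url => n_range.flatMap (fun n =>
              (PySem.List.pyRange 0 ((PySem.Str.len url : Int) - n + 1) 1).map
                (fun i => PySem.Str.slice url (some i) (some (i + n))))))
          if counts.items.isEmpty then acc
          else acc.modify p.1 PySem.Dict.empty
            (fun inner => counts.items.foldl (fun d kv => d.insert kv.1 kv.2) inner)) acc
          (g, (zs.filter (fun ug => ug.2 == g)).map (fun ug => ug.1)))
        = fun acc g =>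
          if (PySem.Dict.counter (FB g)).items.isEmpty then acc
          else acc.modify g PySem.Dict.empty
            (fun inner => (PySem.Dict.counter (FB g)).items.foldl
              (fun d kv => d.insert kv.1 kv.2) inner) := by
      funext acc g
      have harg : ((zs.filter (fun ug => ug.2 == g)).map (fun ug => ug.1)).flatMap
          (fun url => n_range.flatMap (fun n =>
            (PySem.List.pyRange 0 ((PySem.Str.len url : Int) - n + 1) 1).map
              (fun i => PySem.Str.slice url (some i) (some (i + n))))) = FB g := by
        rw [List.flatMap_map]
        rfl
      simp only [harg]
    rw [hstep, pv_B_fold FB gsz hndz PySem.Dict.empty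
        (fun g _ => PySem.Dict.contains_empty g) hneF]
    rfl
  rw [hBfold]
  -- A's outer fold: event fold, then grouped characterisation
  rw [← pv_A_fold urls genres n_range, pv_char, ← hzs,
      pv_genres_set urls genres n_range hpre, ← hgsz]
  refine pvBuildF_congr gsz _ FB ?_
  intro g _
  rw [pv_filter_events n_range g zs]

-- ===== VERDICT (by name: the statement is the Claim_ definition above) =====
theorem calculate_ngram_frequencies_spec : Claim_equal_calculate_ngram_frequencies := by
  intro urls genres n_range _ hpre
  show _ = _
  unfold calculate_ngram_frequencies calculate_ngram_frequencies_alt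
  dsimp only
  rw [pv_outer urls genres n_range hpre]
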